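-- pv_equiv track=rewrite | github.com/selvamani1992/Python_codings | prisoner_escape.py | prisoner_escape
-- ===== SOURCE A (Python) =====
-- def prisoner_escape(cells):
--   count = 0
--   if cells[0] == 1:
--     for i in range(len(cells)):
--       if cells[i] == 1:
--         count += 1
--         cells[i+1:] = [1 if x == 0 else 0 for x in cells[i+1:]]
--   return count
-- ===== SOURCE B (Python) =====
-- def prisoner_escape(cells):
--   if cells[0] != 1:
--     return 0
--   count = 1
--   flips = 1
--   for x in cells[1:]:
--     if (x == 0) if flips % 2 == 1 else (x != 0):
--       count += 1
--       flips += 1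
--   return count
-- ===== Notes on version B (the rewrite author's own statement) =====
-- stated objective: alternative
-- what changed: B replaces A's repeated physical suffix re-flips (a list rewrite per escape) with a single pass that tracks the number of flips applied so far and tests each cell against the flip parity.
import Mathlib
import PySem

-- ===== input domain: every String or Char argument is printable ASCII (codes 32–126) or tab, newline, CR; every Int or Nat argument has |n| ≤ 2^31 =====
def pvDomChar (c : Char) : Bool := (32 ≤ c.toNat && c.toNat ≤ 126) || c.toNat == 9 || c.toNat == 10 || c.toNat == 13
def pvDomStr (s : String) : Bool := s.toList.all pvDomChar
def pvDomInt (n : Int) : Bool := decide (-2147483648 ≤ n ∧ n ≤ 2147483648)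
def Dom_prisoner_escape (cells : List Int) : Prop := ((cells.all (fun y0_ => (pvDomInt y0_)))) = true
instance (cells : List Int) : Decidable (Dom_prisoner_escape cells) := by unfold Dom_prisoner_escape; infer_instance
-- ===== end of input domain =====

-- B counts the same escapes in one pass by tracking how many suffix flips have been
-- applied (flip parity) instead of rewriting the suffix each time (alternative algorithm).
-- Note: Python A mutates its argument in place (slice assignment); B does not — the
-- equivalence proved here is about the RETURN value only.

-- ===== PORT A =====
-- [1 if x == 0 else 0 for x in …]
def peFlip (x : Int) : Int := if x = 0 then 1 else 0

-- body of A's for-loop: state = (cells, count), i the loop index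
def peStepA (st : List Int × Int) (i : Nat) : List Int × Int :=
  if st.1.getD i 0 = 1 then
    (st.1.take (i+1) ++ (st.1.drop (i+1)).map peFlip, st.2 + 1)
  else st

def prisoner_escape (cells : List Int) : Int :=
  match cells with
  | [] => 0   -- unreachable under Pre_: Python raises IndexError reading the first cell
  | c0 :: _ =>
    if c0 = 1 then
      (List.foldl peStepA (cells, (0 : Int)) (List.range cells.length)).2
    else 0

-- ===== PORT B =====
-- body of B's for-loop: state = (count, flips)
def peStepB (st : Int × Int) (x : Int) : Int × Int :=
  if (if st.2 % 2 = 1 then x = 0 else x ≠ 0) then (st.1 + 1, st.2 + 1) else st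

def prisoner_escape_alt (cells : List Int) : Int :=
  match cells with
  | [] => 0   -- unreachable under Pre_: Python raises IndexError reading the first cell
  | c0 :: rest =>
    if c0 ≠ 1 then 0
    else (List.foldl peStepB ((1 : Int), (1 : Int)) rest).1

-- ===== PRECONDITION & SPEC =====
-- Pre_ excludes only the empty list, on which Python A raises IndexError reading the first cell.
def Pre_prisoner_escape (cells : List Int) : Prop := cells ≠ []
instance (cells : List Int) : Decidable (Pre_prisoner_escape cells) := by unfold Pre_prisoner_escape; infer_instance
def pvWitness_prisoner_escape : List Int := [1, 0, 0, 1]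

def Spec_prisoner_escape (cells : List Int) (out : Int) : Prop := out = prisoner_escape_alt cells
instance (cells : List Int) (out : Int) : Decidable (Spec_prisoner_escape cells out) := by unfold Spec_prisoner_escape; infer_instance

-- ===== CLAIM (what is proved, stated in full; the proofs are below) =====
def Claim_equal_prisoner_escape : Prop := ∀ (cells : List Int), Dom_prisoner_escape cells → Pre_prisoner_escape cells → Spec_prisoner_escape cells (prisoner_escape cells)

-- ===== LEMMAS AND PROOFS =====

-- reference count for A's semantics: count the current head if it is 1, flipping the tail
def peSpecA : List Int → Int
  | [] => 0
  | x :: xs => if x = 1 then 1 + peSpecA (xs.map peFlip) else peSpecA xs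
termination_by xs => xs.length
decreasing_by all_goals simp

-- reference count for B's semantics: p = current flip parity (true = odd)
def peSpecB : Bool → List Int → Int
  | _, [] => 0
  | p, x :: xs =>
    if (if p then x = 0 else x ≠ 0) then 1 + peSpecB (!p) xs else peSpecB p xs

lemma peFlip_flip_flip (x : Int) : peFlip (peFlip (peFlip x)) = peFlip x := by
  unfold peFlip; split_ifs <;> simp_all

lemma peSpecA_cons (x : Int) (xs : List Int) :
    peSpecA (x :: xs) = if x = 1 then 1 + peSpecA (xs.map peFlip) else peSpecA xs := by
  rw [peSpecA]

-- one flip layer shifts the parity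
lemma peSpecA_map (p : Bool) (xs : List Int) :
    peSpecA (xs.map (fun x => if p then peFlip x else peFlip (peFlip x))) = peSpecB p xs := by
  induction xs generalizing p with
  | nil => simp [peSpecA, peSpecB]
  | cons x xs ih =>
    simp only [List.map_cons, peSpecA, peSpecB]
    have hhead : ((if p then peFlip x else peFlip (peFlip x)) = 1) ↔ (if p then x = 0 else x ≠ 0) := by
      cases p <;> simp [peFlip] <;> split_ifs <;> simp_all
    have hmap : (xs.map (fun x => if p then peFlip x else peFlip (peFlip x))).map peFlip
        = xs.map (fun x => if (!p) then peFlip x else peFlip (peFlip x)) := by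
      cases p <;> simp [List.map_map, Function.comp, peFlip_flip_flip]
    by_cases h : (if p then x = 0 else x ≠ 0)
    · rw [if_pos (hhead.mpr h), if_pos h, hmap, ih]
    · rw [if_neg (fun hh => h (hhead.mp hh)), if_neg h, ih]

-- A's fold over the remaining indices computes peSpecA of the remaining suffix
lemma peFoldA (k : Nat) : ∀ (i : Nat) (cs : List Int) (c : Int), cs.length = i + k →
    (List.foldl peStepA (cs, c) (List.range' i k)).2 = c + peSpecA (cs.drop i) := by
  induction k with
  | zero =>
    intro i cs c hlen
    have : cs.drop i = [] := by
      apply List.drop_eq_nil_of_le; omega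
    simp [this, peSpecA]
  | succ k ih =>
    intro i cs c hlen
    have hi : i < cs.length := by omega
    have hdrop : cs.drop i = cs[i] :: cs.drop (i+1) := List.drop_eq_getElem_cons hi
    rw [List.range'_succ, List.foldl_cons]
    have hg : cs[i]?.getD 0 = cs[i] := by simp [List.getElem?_eq_getElem hi]
    by_cases h1 : cs[i] = 1
    · set cs' := cs.take (i+1) ++ (cs.drop (i+1)).map peFlip with hcs'
      have hstep : peStepA (cs, c) i = (cs', c + 1) := by
        simp [peStepA, List.getD, hg, h1, hcs']
      have hlen' : cs'.length = (i+1) + k := by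
        simp [hcs', List.length_take, List.length_drop]; omega
      have ht : (cs.take (i+1)).length = i+1 := by simp [List.length_take]; omega
      have hdrop' : cs'.drop (i+1) = (cs.drop (i+1)).map peFlip := by
        rw [hcs', List.drop_left' ht]
      rw [hstep, ih (i+1) cs' (c+1) hlen', hdrop', hdrop, peSpecA_cons]
      rw [if_pos h1]; ring
    · have hstep : peStepA (cs, c) i = (cs, c) := by
        simp [peStepA, List.getD, hg, h1]
      have hlen2 : cs.length = (i+1) + k := by omega
      rw [hstep, ih (i+1) cs c hlen2, hdrop, peSpecA_cons, if_neg h1]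

-- B's fold computes peSpecB at the parity of the flip counter
lemma peFoldB (xs : List Int) : ∀ (c f : Int),
    (List.foldl peStepB (c, f) xs).1 = c + peSpecB (decide (f % 2 = 1)) xs := by
  induction xs with
  | nil => intro c f; simp [peSpecB]
  | cons x xs ih =>
    intro c f
    rw [List.foldl_cons]
    by_cases hp : f % 2 = 1
    · have hp1 : ¬ ((f+1) % 2 = 1) := by omega
      by_cases hx : x = 0
      · have hstep : peStepB (c, f) x = (c + 1, f + 1) := by
          simp [peStepB, hp, hx]
        rw [hstep, ih]
        simp [peSpecB, hx, hp, hp1]; ring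
      · have hstep : peStepB (c, f) x = (c, f) := by
          simp [peStepB, hp, hx]
        rw [hstep, ih]
        simp [peSpecB, hx, hp]
    · have hp1 : (f+1) % 2 = 1 := by omega
      by_cases hx : x = 0
      · have hstep : peStepB (c, f) x = (c, f) := by
          simp [peStepB, hp, hx]
        rw [hstep, ih]
        simp [peSpecB, hx, hp]
      · have hstep : peStepB (c, f) x = (c + 1, f + 1) := by
          simp [peStepB, hp, hx]
        rw [hstep, ih]
        simp [peSpecB, hx, hp, hp1]; ring

-- ===== VERDICT (by name: the statement is the Claim_ definition above) =====
theorem prisoner_escape_spec : Claim_equal_prisoner_escape := by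
  intro cells _ hpre
  unfold Spec_prisoner_escape
  match cells with
  | [] => exact absurd rfl hpre
  | c0 :: rest =>
    show (if c0 = 1 then (List.foldl peStepA (c0 :: rest, (0:Int)) (List.range (c0 :: rest).length)).2 else 0)
        = (if c0 ≠ 1 then 0 else (List.foldl peStepB ((1:Int), (1:Int)) rest).1)
    by_cases h1 : c0 = 1
    · subst h1
      rw [if_pos rfl, if_neg (by simp)]
      have hA := peFoldA ((1 :: rest) : List Int).length 0 ((1 : Int) :: rest) 0 (by omega)
      rw [List.range_eq_range', hA]
      simp only [List.drop_zero]
      rw [peFoldB rest 1 1]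
      have h2 : peSpecA ((1 : Int) :: rest) = 1 + peSpecA (rest.map peFlip) := by
        rw [peSpecA_cons, if_pos rfl]
      have h3 : rest.map peFlip = rest.map (fun x => if true then peFlip x else peFlip (peFlip x)) := by
        simp
      rw [h2, h3, peSpecA_map]
      norm_num
    · rw [if_neg h1, if_pos h1]
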